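-- pv_equiv track=rewrite | github.com/quickwind/focus-mapper | tools/populate_focus_spec.py | _parse_table_after_marker
-- ===== SOURCE A (Python) =====
-- def _parse_table_after_marker(md: str, marker: str) -> list[list[str]]:
--     if marker not in md:
--         return []
--     after = md.split(marker, 1)[1]
--     rows: list[list[str]] = []
--     started = False
--     for raw_line in after.splitlines():
--         line = raw_line.strip()
--         if not line.startswith("|"):
--             if started:
--                 break
--             continue
--         started = True
--         cells = [c.strip() for c in line.strip().strip("|").split("|")]
--         rows.append(cells)
--     return rows
-- ===== SOURCE B (Python) =====
-- def _parse_table_after_marker(md: str, marker: str) -> list[list[str]]: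
--     if marker not in md:
--         return []
--     lines = [l.strip() for l in md.split(marker, 1)[1].splitlines()]
--     while lines and not lines[0].startswith("|"):
--         lines.pop(0)
--     block = []
--     while lines and lines[0].startswith("|"):
--         block.append(lines.pop(0))
--     return [[c.strip() for c in l.strip("|").split("|")] for l in block]
-- ===== Notes on version B (the rewrite author's own statement) =====
-- stated objective: simpler
-- what changed: A's single pass with started/break flag state machine is replaced by staged phases: strip all lines once, drop the non-'|' preamble, take the consecutive '|' block, then map each block line to its cells.
import Mathlib
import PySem

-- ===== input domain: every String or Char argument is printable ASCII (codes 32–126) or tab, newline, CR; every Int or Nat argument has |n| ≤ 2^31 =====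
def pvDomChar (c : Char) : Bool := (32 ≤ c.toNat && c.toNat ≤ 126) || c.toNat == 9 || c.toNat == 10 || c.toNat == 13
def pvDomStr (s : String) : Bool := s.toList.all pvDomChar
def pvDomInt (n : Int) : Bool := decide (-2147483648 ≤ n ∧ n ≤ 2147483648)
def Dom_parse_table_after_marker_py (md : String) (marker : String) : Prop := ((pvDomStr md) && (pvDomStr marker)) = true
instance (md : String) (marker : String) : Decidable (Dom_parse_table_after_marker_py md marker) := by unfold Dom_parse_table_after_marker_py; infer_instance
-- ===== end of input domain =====

-- B replaces A's one-pass flag/break state machine by a strip-all-lines pass, a drop-preamble scan,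
-- a take-block scan and a final map (objective: simpler decomposition; same cost).

-- ===== PORT A =====
-- A's for-loop carries (rows, started, broken); 'break' is modelled by the broken flag freezing the state.
def pvStepA (st : List (List String) × Bool × Bool) (raw_line : String) :
    List (List String) × Bool × Bool :=
  match st with
  | (rows, started, broken) =>
    if broken then (rows, started, broken)
    else
      let line := PySem.Str.strip raw_line
      if !(PySem.Str.startswith line "|") then
        if started then (rows, started, true) else (rows, started, broken)
      else
        (rows ++ [((PySem.Str.split? (PySem.Str.stripChars (PySem.Str.strip line) "|") "|").getD []).map PySem.Str.strip],
         true, broken)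

def parse_table_after_marker_py (md : String) (marker : String) : List (List String) :=
  if PySem.Str.isIn marker md = false then []
  else
    match PySem.Str.splitMax? md marker 1 with
    | none => []                   -- marker = "" would raise ValueError; excluded by Pre_
    | some parts =>
      match PySem.List.pyGet? parts 1 with
      | none => []                 -- unreachable: marker ∈ md gives ≥ 2 parts
      | some after =>
        ((PySem.Str.splitlines after).foldl pvStepA ([], false, false)).1

-- ===== PORT B =====
-- Source B's first while loop: drop leading stripped lines that do not start with '|'
def pvDropPreamble : List String → List String
  | [] => []
  | l :: t => if PySem.Str.startswith l "|" then l :: t else pvDropPreamble t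

-- Source B's second while loop: collect the consecutive '|' lines
def pvTakeBlock : List String → List String
  | [] => []
  | l :: t => if PySem.Str.startswith l "|" then l :: pvTakeBlock t else []

def pvCells (l : String) : List String :=
  ((PySem.Str.split? (PySem.Str.stripChars l "|") "|").getD []).map PySem.Str.strip

def parse_table_after_marker_py_alt (md : String) (marker : String) : List (List String) :=
  if PySem.Str.isIn marker md = false then []
  else
    match PySem.Str.splitMax? md marker 1 with
    | none => []                   -- marker = "" would raise ValueError; excluded by Pre_
    | some parts =>
      match PySem.List.pyGet? parts 1 with
      | none => []                 -- unreachable: marker ∈ md gives ≥ 2 parts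
      | some after =>
        (pvTakeBlock (pvDropPreamble ((PySem.Str.splitlines after).map PySem.Str.strip))).map pvCells

-- ===== PRECONDITION & SPEC =====
-- Pre_ excludes only marker = "", on which both A and B raise ValueError (str.split with empty separator).
def Pre_parse_table_after_marker_py (md : String) (marker : String) : Prop := marker ≠ ""
instance (md : String) (marker : String) : Decidable (Pre_parse_table_after_marker_py md marker) := by
  unfold Pre_parse_table_after_marker_py; infer_instance

def pvWitness_parse_table_after_marker_py : String × String := ("Spec\n| a | b |\n|1|2|\ndone", "Spec")

def Spec_parse_table_after_marker_py (md : String) (marker : String) (out : List (List String)) : Prop :=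
  out = parse_table_after_marker_py_alt md marker
instance (md : String) (marker : String) (out : List (List String)) :
    Decidable (Spec_parse_table_after_marker_py md marker out) := by
  unfold Spec_parse_table_after_marker_py; infer_instance

-- ===== CLAIM =====
def Claim_equal_parse_table_after_marker_py : Prop :=
  ∀ (md : String) (marker : String), Dom_parse_table_after_marker_py md marker →
    Pre_parse_table_after_marker_py md marker →
    Spec_parse_table_after_marker_py md marker (parse_table_after_marker_py md marker)

-- ===== LEMMAS AND PROOFS =====
theorem pv_dw_idem {α} (p : α → Bool) (l : List α) :
    List.dropWhile p (List.dropWhile p l) = List.dropWhile p l := by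
  induction l with
  | nil => simp
  | cons a t ih =>
    by_cases h : p a = true
    · simp [h, ih]
    · simp [h]

theorem pv_dw_of_prefix {α} (p : α → Bool) {l l' : List α}
    (h : l' <+: l) (hl : List.dropWhile p l = l) : List.dropWhile p l' = l' := by
  cases l' with
  | nil => simp
  | cons a t =>
    cases l with
    | nil => simp at h
    | cons b s =>
      obtain ⟨r, hr⟩ := h
      injection hr with h1 h2
      subst h1
      by_cases hp : p a = true
      · rw [List.dropWhile_cons_of_pos hp] at hl
        have hs : (List.dropWhile p s).Sublist s := List.dropWhile_sublist p
        have := hs.length_le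
        rw [hl] at this
        simp at this
      · rw [List.dropWhile_cons_of_neg hp]

theorem pv_rstrip_prefix (l : List Char) : PySem.Chars.rstrip l <+: l := by
  have h := List.dropWhile_suffix (l := l.reverse) (p := PySem.Chars.isspace)
  simpa [PySem.Chars.rstrip] using h.reverse

theorem pv_chars_strip_idem (l : List Char) :
    PySem.Chars.strip (PySem.Chars.strip l) = PySem.Chars.strip l := by
  have hlid : List.dropWhile PySem.Chars.isspace (PySem.Chars.lstrip l) = PySem.Chars.lstrip l := by
    simpa [PySem.Chars.lstrip] using pv_dw_idem PySem.Chars.isspace l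
  have h1 : PySem.Chars.lstrip (PySem.Chars.rstrip (PySem.Chars.lstrip l)) =
      PySem.Chars.rstrip (PySem.Chars.lstrip l) := by
    simpa [PySem.Chars.lstrip] using
      pv_dw_of_prefix PySem.Chars.isspace (pv_rstrip_prefix (PySem.Chars.lstrip l)) hlid
  have h2 : PySem.Chars.rstrip (PySem.Chars.rstrip (PySem.Chars.lstrip l)) =
      PySem.Chars.rstrip (PySem.Chars.lstrip l) := by
    simp [PySem.Chars.rstrip, pv_dw_idem]
  simp [PySem.Chars.strip, h1, h2]

theorem pv_strip_idem (s : String) : PySem.Str.strip (PySem.Str.strip s) = PySem.Str.strip s := by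
  simp [PySem.Str.strip, pv_chars_strip_idem]

theorem pv_foldl_broken (ls : List String) (rows : List (List String)) (s : Bool) :
    (ls.foldl pvStepA (rows, s, true)).1 = rows := by
  induction ls with
  | nil => rfl
  | cons a t ih => simpa [pvStepA] using ih

theorem pv_foldl_started (ls : List String) (rows : List (List String)) :
    (ls.foldl pvStepA (rows, true, false)).1 =
      rows ++ (pvTakeBlock (ls.map PySem.Str.strip)).map pvCells := by
  induction ls generalizing rows with
  | nil => simp [pvTakeBlock]
  | cons a t ih =>
    cases h : PySem.Chars.startswith (PySem.Chars.strip a.toList) ['|'] with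
    | true =>
      rw [List.foldl_cons, show pvStepA (rows, true, false) a =
            (rows ++ [pvCells (PySem.Str.strip a)], true, false) by
          simp [pvStepA, pvCells, h, pv_strip_idem]]
      rw [ih]
      simp [pvTakeBlock, h]
    | false =>
      rw [List.foldl_cons, show pvStepA (rows, true, false) a = (rows, true, true) by
          simp [pvStepA, h]]
      rw [pv_foldl_broken]
      simp [pvTakeBlock, h]

theorem pv_foldl_unstarted (ls : List String) (rows : List (List String)) :
    (ls.foldl pvStepA (rows, false, false)).1 =
      rows ++ (pvTakeBlock (pvDropPreamble (ls.map PySem.Str.strip))).map pvCells := by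
  induction ls generalizing rows with
  | nil => simp [pvDropPreamble, pvTakeBlock]
  | cons a t ih =>
    cases h : PySem.Chars.startswith (PySem.Chars.strip a.toList) ['|'] with
    | true =>
      rw [List.foldl_cons, show pvStepA (rows, false, false) a =
            (rows ++ [pvCells (PySem.Str.strip a)], true, false) by
          simp [pvStepA, pvCells, h, pv_strip_idem]]
      rw [pv_foldl_started]
      simp [pvDropPreamble, pvTakeBlock, h]
    | false =>
      rw [List.foldl_cons, show pvStepA (rows, false, false) a = (rows, false, false) by
          simp [pvStepA, h]]
      rw [ih]
      simp [pvDropPreamble, h]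

-- ===== VERDICT =====
theorem parse_table_after_marker_py_spec : Claim_equal_parse_table_after_marker_py := by
  intro md marker _ _
  unfold Spec_parse_table_after_marker_py parse_table_after_marker_py parse_table_after_marker_py_alt
  cases hin : PySem.Str.isIn marker md with
  | true =>
    cases h1 : PySem.Str.splitMax? md marker 1 with
    | none => rfl
    | some parts =>
      dsimp only
      cases h2 : PySem.List.pyGet? parts 1 with
      | none => rfl
      | some after =>
        simpa using pv_foldl_unstarted (PySem.Str.splitlines after) []
  | false => rfl
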